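-- pv_equiv track=rewrite | github.com/JeongMin-98/StudyForCodingtest | stack_queue/기능개발.py | solution
-- ===== SOURCE A (Python) =====
-- def solution(progress, speeds):
--     answer = []
--     workdone = []
--     while len(progress) > 0:
--         work = progress.pop(0)
--         speed = speeds.pop(0)
--
--         remain = (100 - work) % speed
--         if remain:
--             days = (100-work) // speed + 1
--         else:
--             days = (100-work) // speed
--
--         workdone.append(days)
--     release_day = workdone.pop(0)
--     release_work = 1
--     while len(workdone) > 0:
--         new_release = workdone.pop(0)
--         if release_day >= new_release:
--             release_work += 1
--         else:
--             answer.append(release_work)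
--             release_day = new_release
--             release_work = 1
--     answer.append(release_work)
--     return answer
-- ===== SOURCE B (Python) =====
-- def solution(progress, speeds):
--     # Phase 1: drain both lists with the same pops as the original.
--     days = []
--     while len(progress) > 0:
--         days.append(-((progress.pop(0) - 100) // speeds.pop(0)))
--     # Phase 2: running-maximum list, then run-length encode it.
--     m = days[0]
--     peaks = []
--     for d in days:
--         if d > m:
--             m = d
--         peaks.append(m)
--     return _run_lengths(peaks)
--
-- def _run_lengths(xs):
--     out = []
--     cur = xs[0]
--     cnt = 1
--     for x in xs[1:]:
--         if x == cur:
--             cnt += 1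
--         else:
--             out.append(cnt)
--             cur = x
--             cnt = 1
--     out.append(cnt)
--     return out
-- ===== Notes on version B (the rewrite author's own statement) =====
-- stated objective: alternative
-- what changed: Replaces the release_day/counter state machine of phase 2 by two independent passes: build the running-maximum (prefix peak) list of the deploy days, then run-length encode that monotone list; group sizes equal the run lengths because a new release starts exactly when a day exceeds every earlier day.
import Mathlib
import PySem

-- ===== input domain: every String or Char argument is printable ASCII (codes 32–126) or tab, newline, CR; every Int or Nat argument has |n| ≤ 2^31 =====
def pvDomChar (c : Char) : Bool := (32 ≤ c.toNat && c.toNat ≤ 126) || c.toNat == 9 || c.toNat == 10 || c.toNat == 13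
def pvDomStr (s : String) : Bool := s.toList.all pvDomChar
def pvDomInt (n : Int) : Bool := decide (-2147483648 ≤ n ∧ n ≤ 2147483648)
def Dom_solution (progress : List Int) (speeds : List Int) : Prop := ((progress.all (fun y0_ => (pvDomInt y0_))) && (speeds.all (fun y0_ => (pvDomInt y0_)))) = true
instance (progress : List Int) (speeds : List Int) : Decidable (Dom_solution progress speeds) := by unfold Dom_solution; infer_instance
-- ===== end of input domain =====

-- B replaces A's release-day state machine by running-maximum + run-length encoding (alternative
-- decomposition, same cost); both Pythons mutate their arguments identically (phase 1 empties
-- `progress` and pops the used prefix of `speeds`); the theorem is about the return value.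

-- ===== PORT A =====
-- phase 1: while progress: work = progress.pop(0); speed = speeds.pop(0); append ceil days
def pvBuildDays : List Int → List Int → List Int
  | [], _ => []
  | _ :: _, [] => []      -- Python raises IndexError here (excluded by Pre_)
  | w :: ps, s :: ss =>
      (if PySem.Int.mod (100 - w) s ≠ 0 then PySem.Int.floordiv (100 - w) s + 1
       else PySem.Int.floordiv (100 - w) s) :: pvBuildDays ps ss

-- phase 2: the release_day / release_work state machine, answer as accumulator
def pvGroupLoop : List Int → Int → Int → List Int → List Int
  | [], _, rw, answer => answer ++ [rw]
  | n :: rest, rd, rw, answer =>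
      if rd ≥ n then pvGroupLoop rest rd (rw + 1) answer
      else pvGroupLoop rest n 1 (answer ++ [rw])

def solution (progress : List Int) (speeds : List Int) : List Int :=
  match pvBuildDays progress speeds with
  | [] => []              -- Python raises IndexError on workdone.pop(0) (excluded by Pre_)
  | d :: rest => pvGroupLoop rest d 1 []

-- ===== PORT B =====
-- phase 1 of Source B: days.append(-((progress.pop(0) - 100) // speeds.pop(0)))
def pvDaysB : List Int → List Int → List Int
  | [], _ => []
  | _ :: _, [] => []      -- Python raises IndexError here (excluded by Pre_)
  | w :: ps, s :: ss => (-(PySem.Int.floordiv (w - 100) s)) :: pvDaysB ps ss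

-- running-maximum list: m starts at days[0], 'if d > m: m = d' then append m
def pvPeaks : Int → List Int → List Int
  | _, [] => []
  | m, d :: ds => (if d > m then d else m) :: pvPeaks (if d > m then d else m) ds

-- _run_lengths: cur = xs[0], cnt = 1, loop over xs[1:], out as accumulator
def pvRle : List Int → Int → Int → List Int → List Int
  | [], _, cnt, out => out ++ [cnt]
  | x :: xs, cur, cnt, out =>
      if x = cur then pvRle xs cur (cnt + 1) out
      else pvRle xs x 1 (out ++ [cnt])

def solution_alt (progress : List Int) (speeds : List Int) : List Int :=
  match pvDaysB progress speeds with
  | [] => []              -- Python raises IndexError on days[0] (excluded by Pre_)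
  | d0 :: rest =>
    match pvPeaks d0 (d0 :: rest) with
    | [] => []            -- unreachable: pvPeaks of a nonempty list is nonempty
    | p :: ps => pvRle ps p 1 []

-- ===== PRECONDITION & SPEC =====
-- Pre_ excludes exactly the inputs where the Python A raises: empty progress (IndexError on
-- workdone.pop(0)), speeds shorter than progress (IndexError), and a zero speed among the
-- used prefix (ZeroDivisionError). B raises on the same inputs.
def Pre_solution (progress : List Int) (speeds : List Int) : Prop :=
  progress ≠ [] ∧ progress.length ≤ speeds.length ∧ ∀ s ∈ speeds.take progress.length, s ≠ 0
instance (progress : List Int) (speeds : List Int) : Decidable (Pre_solution progress speeds) := by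
  unfold Pre_solution; infer_instance
def pvWitness_solution : List Int × List Int := ([93, 30, 55], [1, 30, 5])

def Spec_solution (progress : List Int) (speeds : List Int) (out : List Int) : Prop := out = solution_alt progress speeds
instance (progress : List Int) (speeds : List Int) (out : List Int) : Decidable (Spec_solution progress speeds out) := by unfold Spec_solution; infer_instance

-- ===== CLAIM (what is proved, stated in full; the proofs are below) =====
def Claim_equal_solution : Prop := ∀ (progress : List Int) (speeds : List Int), Dom_solution progress speeds → Pre_solution progress speeds → Spec_solution progress speeds (solution progress speeds)

-- ===== LEMMAS AND PROOFS =====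

-- ceiling division: A's remainder test equals B's -((w-100)//s), positive divisor
theorem pvCeil_pos (a b : Int) (hb : 0 < b) :
    (if PySem.Int.mod a b ≠ 0 then PySem.Int.floordiv a b + 1 else PySem.Int.floordiv a b)
      = -(PySem.Int.floordiv (-a) b) := by
  have h := PySem.Int.floordiv_mul_add_mod a b
  have h0 := PySem.Int.mod_nonneg a hb
  have h1 := PySem.Int.mod_lt a hb
  by_cases hr : PySem.Int.mod a b = 0
  · rw [if_neg (by simp [hr])]
    exact ((PySem.Int.neg_floordiv_neg_eq_iff_of_pos hb).mpr ⟨by nlinarith, by nlinarith⟩).symm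
  · simp only [hr, ne_eq, not_false_eq_true, if_pos]
    have hr' : 0 < PySem.Int.mod a b := lt_of_le_of_ne h0 (Ne.symm hr)
    exact ((PySem.Int.neg_floordiv_neg_eq_iff_of_pos hb).mpr ⟨by nlinarith, by nlinarith⟩).symm

theorem pvCeil (a b : Int) (hb : b ≠ 0) :
    (if PySem.Int.mod a b ≠ 0 then PySem.Int.floordiv a b + 1 else PySem.Int.floordiv a b)
      = -(PySem.Int.floordiv (-a) b) := by
  rcases lt_or_gt_of_ne hb with hneg | hpos
  · have e1 : PySem.Int.mod a b = -(PySem.Int.mod (-a) (-b)) := by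
      have := PySem.Int.mod_neg_neg (-a) (-b); rw [neg_neg, neg_neg] at this; omega
    have e2 : PySem.Int.floordiv a b = PySem.Int.floordiv (-a) (-b) := by
      have := PySem.Int.floordiv_neg_neg (-a) (-b); rw [neg_neg, neg_neg] at this; omega
    have e3 : PySem.Int.floordiv (-a) b = PySem.Int.floordiv a (-b) := by
      have := PySem.Int.floordiv_neg_neg a (-b); simpa using this
    rw [e1, e2, e3]
    have hb' : (0:Int) < -b := by omega
    have := pvCeil_pos (-a) (-b) hb'
    simpa using this
  · exact pvCeil_pos a b hpos

-- phase 1 of A and of B produce the same days list when no used speed is zero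
theorem pvDays_eq : ∀ (ps ss : List Int), (∀ s ∈ ss.take ps.length, s ≠ 0) →
    pvBuildDays ps ss = pvDaysB ps ss := by
  intro ps
  induction ps with
  | nil => intro ss _; cases ss <;> rfl
  | cons w ps ih =>
    intro ss hz
    cases ss with
    | nil => rfl
    | cons s ss =>
      have hs : s ≠ 0 := hz s (by simp)
      have hrest : ∀ t ∈ ss.take ps.length, t ≠ 0 := by
        intro t ht; exact hz t (by simp; right; exact ht)
      simp only [pvBuildDays, pvDaysB]
      rw [ih ss hrest, show w - 100 = -(100 - w) by ring, pvCeil (100 - w) s hs]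

-- the state machine equals run-length encoding of the running-maximum list
theorem pvGroup_rle : ∀ (ds : List Int) (rd rw : Int) (ans : List Int),
    pvGroupLoop ds rd rw ans = pvRle (pvPeaks rd ds) rd rw ans := by
  intro ds
  induction ds with
  | nil => intro rd rw ans; rfl
  | cons d ds ih =>
    intro rd rw ans
    by_cases h : rd ≥ d
    · have hm : ¬ d > rd := by omega
      simp only [pvGroupLoop, pvPeaks, pvRle, if_pos h, if_neg hm, if_true]
      exact ih rd (rw + 1) ans
    · have hm : d > rd := by omega
      have hne : ¬ d = rd := by omega
      simp only [pvGroupLoop, pvPeaks, pvRle, if_neg h, if_pos hm]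
      rw [if_neg hne]
      exact ih d 1 (ans ++ [rw])

-- ===== VERDICT (by name: the statement is the Claim_ definition above) =====
theorem solution_spec : Claim_equal_solution := by
  intro progress speeds _ hpre
  unfold Spec_solution solution solution_alt
  rw [pvDays_eq progress speeds hpre.2.2]
  cases hd : pvDaysB progress speeds with
  | nil => rfl
  | cons d rest =>
    have hpk : pvPeaks d (d :: rest) = d :: pvPeaks d rest := by
      simp [pvPeaks]
    show pvGroupLoop rest d 1 [] =
      (match pvPeaks d (d :: rest) with
       | [] => ([] : List Int)
       | p :: ps => pvRle ps p 1 [])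
    rw [hpk]
    exact pvGroup_rle rest d 1 []
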